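-- pv_equiv track=rewrite | github.com/Nguyen-Thanh-Huy-io/doancanhan | thuattoan.py | is_valid_board_values_csp
-- ===== SOURCE A (Python) =====
-- def is_valid_board_values_csp(board_list_of_lists):
--     seen = set()
--     count = 0
--     if not isinstance(board_list_of_lists, list) or len(board_list_of_lists) != 3:
--         return False
--     for row in board_list_of_lists:
--         if not isinstance(row, list) or len(row) != 3:
--             return False
--         for val in row:
--             if not isinstance(val, int) or not (0 <= val <= 8):
--                 return False
--             if val != 0:
--                 if val in seen:
--                     return False
--                 seen.add(val)
--             count += 1
--     return count == 9 and len(seen) == 8 # (Constants from Pygame code, can be defined here or passed if needed)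
-- ===== SOURCE B (Python) =====
-- def is_valid_board_values_csp(board_list_of_lists):
--     if not isinstance(board_list_of_lists, list) or len(board_list_of_lists) != 3:
--         return False
--     flat = []
--     for row in board_list_of_lists:
--         if not isinstance(row, list) or len(row) != 3:
--             return False
--         flat.extend(row)
--     if not all(isinstance(v, int) for v in flat):
--         return False
--     return sorted(flat) == list(range(9))
-- ===== Notes on version B (the rewrite author's own statement) =====
-- stated objective: simpler
-- what changed: Replaced A's seen-set bookkeeping with per-value range checks, duplicate test and count/len(seen) final check by flattening the board and comparing sorted(flat) to list(range(9)).
import Mathlib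
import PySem

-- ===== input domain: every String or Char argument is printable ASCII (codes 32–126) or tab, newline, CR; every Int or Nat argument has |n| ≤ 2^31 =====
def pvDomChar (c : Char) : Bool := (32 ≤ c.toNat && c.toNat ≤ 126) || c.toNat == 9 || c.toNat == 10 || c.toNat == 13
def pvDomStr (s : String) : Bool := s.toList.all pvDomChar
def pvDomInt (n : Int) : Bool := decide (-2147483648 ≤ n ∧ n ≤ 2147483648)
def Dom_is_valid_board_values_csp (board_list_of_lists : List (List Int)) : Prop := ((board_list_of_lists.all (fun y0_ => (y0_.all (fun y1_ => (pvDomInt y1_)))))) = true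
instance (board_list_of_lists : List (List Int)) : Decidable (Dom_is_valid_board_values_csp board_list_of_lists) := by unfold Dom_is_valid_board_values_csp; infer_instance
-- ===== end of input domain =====

-- B replaces A's seen-set/count bookkeeping by flattening the board and comparing
-- sorted(flat) with list(range(9)) (objective: simpler). Both are total on List (List Int).

-- ===== PORT A =====
-- inner 'for val in row' loop: state (seen, count), none = an early 'return False'
-- (isinstance(val, int) is always true under the type convention)
def pvAVals : List Int → PySem.Set Int → Int → Option (PySem.Set Int × Int)
  | [], seen, count => some (seen, count)
  | v :: vs, seen, count =>
    if ¬ (0 ≤ v ∧ v ≤ 8) then none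
    else if v ≠ 0 then
      if PySem.Set.contains seen v then none
      else pvAVals vs (PySem.Set.add seen v) (count + 1)
    else pvAVals vs seen (count + 1)

-- outer 'for row in board_list_of_lists' loop (isinstance(row, list) is always true)
def pvARows : List (List Int) → PySem.Set Int → Int → Option (PySem.Set Int × Int)
  | [], seen, count => some (seen, count)
  | r :: rs, seen, count =>
    if r.length ≠ 3 then none
    else match pvAVals r seen count with
      | none => none
      | some (seen', count') => pvARows rs seen' count'

def is_valid_board_values_csp (board_list_of_lists : List (List Int)) : Bool :=
  if board_list_of_lists.length ≠ 3 then false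
  else match pvARows board_list_of_lists PySem.Set.empty 0 with
    | none => false
    | some (seen, count) => decide (count = 9) && decide (PySem.Set.len seen = 8)

-- ===== PORT B =====
-- 'for row: check len, flat.extend(row)' loop, none = early 'return False'
def pvBFlat : List (List Int) → Option (List Int)
  | [] => some []
  | r :: rs => if r.length ≠ 3 then none else (pvBFlat rs).map (r ++ ·)

def is_valid_board_values_csp_alt (board_list_of_lists : List (List Int)) : Bool :=
  if board_list_of_lists.length ≠ 3 then false
  else match pvBFlat board_list_of_lists with
    | none => false
    -- all(isinstance(v, int)) is always true under the type convention
    | some flat => PySem.List.sorted flat (fun x => x) false == PySem.List.pyRange 0 9 1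

-- ===== PRECONDITION & SPEC =====
def Spec_is_valid_board_values_csp (board_list_of_lists : List (List Int)) (out : Bool) : Prop := out = is_valid_board_values_csp_alt board_list_of_lists
instance (board_list_of_lists : List (List Int)) (out : Bool) : Decidable (Spec_is_valid_board_values_csp board_list_of_lists out) := by unfold Spec_is_valid_board_values_csp; infer_instance

-- ===== CLAIM (what is proved, stated in full; the proofs are below) =====
def Claim_equal_is_valid_board_values_csp : Prop := ∀ (board_list_of_lists : List (List Int)), Dom_is_valid_board_values_csp board_list_of_lists → Spec_is_valid_board_values_csp board_list_of_lists (is_valid_board_values_csp board_list_of_lists)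

-- ===== LEMMAS AND PROOFS =====

-- the conditions under which A's inner loop runs to completion
def pvGood (vs : List Int) (seen : PySem.Set Int) : Bool :=
  (vs.all fun v => decide (0 ≤ v) && decide (v ≤ 8)) &&
    (vs.filter (fun v => v != 0)).Nodup &&
    (vs.all fun v => !(v != 0) || !(seen.contains v))

theorem pvAVals_char (vs : List Int) : ∀ (seen : PySem.Set Int) (count : Int),
    pvAVals vs seen count =
      if pvGood vs seen = true then
        some (PySem.Set.update seen (vs.filter (fun v => v != 0)), count + vs.length)
      else none := by
  induction vs with
  | nil =>
      intro seen count
      simp [pvAVals, pvGood, PySem.Set.update]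
  | cons v vs ih =>
      intro seen count
      rw [pvAVals]
      by_cases h1 : 0 ≤ v ∧ v ≤ 8
      · by_cases h2 : v = 0
        · subst h2
          rw [if_neg (by simp [h1]), if_neg (by simp), ih]
          by_cases hg : pvGood vs seen = true
          · rw [if_pos hg, if_pos ?_]
            · simp
              omega
            · simp only [pvGood, List.all_cons, List.filter_cons] at hg ⊢
              simp at hg ⊢
              tauto
          · rw [if_neg hg, if_neg ?_]
            simp only [pvGood, List.all_cons, List.filter_cons] at hg ⊢
            simp at hg ⊢
            tauto
        · by_cases h3 : PySem.Set.contains seen v = true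
          · rw [if_neg (by simp [h1]), if_pos h2, if_pos h3, if_neg ?_]
            simp only [pvGood, List.all_cons]
            simp at h3 ⊢
            tauto
          · rw [if_neg (by simp [h1]), if_pos h2, if_neg h3, ih]
            by_cases hg : pvGood vs (seen.add v) = true
            · rw [if_pos hg, if_pos ?_]
              · simp [h2, PySem.Set.update_cons]
                omega
              · simp only [pvGood, List.all_cons, List.filter_cons] at hg ⊢
                simp [PySem.Set.mem_add, List.mem_filter, h2] at hg ⊢
                simp at h3
                obtain ⟨⟨hr, hn⟩, hf⟩ := hg
                refine ⟨⟨⟨h1, hr⟩, ?_, hn⟩, h3, fun x hx => ?_⟩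
                · intro hv
                  rcases hf v hv with h | h
                  · exact h2 h
                  · exact h.2 rfl
                · rcases hf x hx with h | h
                  · exact Or.inl h
                  · exact Or.inr h.1
            · rw [if_neg hg, if_neg ?_]
              simp only [pvGood, List.all_cons, List.filter_cons] at hg ⊢
              simp [PySem.Set.mem_add, List.mem_filter, h2] at hg ⊢
              simp at h3
              intro _ _ h6 h7 h8 _
              obtain ⟨x, hx, hx0, himp⟩ := hg h6 h8
              by_cases hxs : x ∈ seen
              · exact ⟨x, hx, hx0, hxs⟩
              · exact absurd (himp hxs ▸ hx) h7
      · rw [if_pos h1, if_neg ?_]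
        simp only [pvGood, List.all_cons]
        simp [h1]

theorem pvAVals_append (xs ys : List Int) : ∀ (s : PySem.Set Int) (c : Int),
    pvAVals (xs ++ ys) s c =
      match pvAVals xs s c with
      | none => none
      | some (s', c') => pvAVals ys s' c' := by
  induction xs with
  | nil => intro s c; simp [pvAVals]
  | cons v vs ih =>
      intro s c
      rw [List.cons_append, pvAVals, pvAVals]
      split_ifs <;> simp [ih]

theorem pvARows_none (rs : List (List Int)) : ∀ (seen : PySem.Set Int) (count : Int),
    (∃ r ∈ rs, r.length ≠ 3) → pvARows rs seen count = none := by
  induction rs with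
  | nil => intro _ _ h; simp at h
  | cons r rs ih =>
      intro seen count h
      rw [pvARows]
      by_cases hr : r.length = 3
      · rw [if_neg (by simp [hr])]
        rcases h with ⟨r', hr', hl⟩
        rcases List.mem_cons.mp hr' with h' | h'
        · exact absurd (h' ▸ hr) hl
        · cases hv : pvAVals r seen count with
          | none => rfl
          | some p => exact ih _ _ ⟨r', h', hl⟩
      · rw [if_pos hr]

theorem pvARows_eq_vals (rs : List (List Int)) : ∀ (seen : PySem.Set Int) (count : Int),
    (∀ r ∈ rs, r.length = 3) → pvARows rs seen count = pvAVals rs.flatten seen count := by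
  induction rs with
  | nil => intro seen count _; simp [pvARows, pvAVals]
  | cons r rs ih =>
      intro seen count h
      rw [pvARows, List.flatten_cons, pvAVals_append,
        if_neg (by simp [h r (List.mem_cons_self)])]
      cases hv : pvAVals r seen count with
      | none => rfl
      | some p => exact ih _ _ (fun r' hr' => h r' (List.mem_cons_of_mem _ hr'))

theorem pvBFlat_none (rs : List (List Int)) (h : ∃ r ∈ rs, r.length ≠ 3) :
    pvBFlat rs = none := by
  induction rs with
  | nil => simp at h
  | cons r rs ih =>
      rw [pvBFlat]
      by_cases hr : r.length = 3
      · rcases h with ⟨r', hr', hl⟩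
        rcases List.mem_cons.mp hr' with h' | h'
        · exact absurd (h' ▸ hr) hl
        · rw [if_neg (by simp [hr]), ih ⟨r', h', hl⟩]
          rfl
      · rw [if_pos hr]

theorem pvBFlat_some (rs : List (List Int)) (h : ∀ r ∈ rs, r.length = 3) :
    pvBFlat rs = some rs.flatten := by
  induction rs with
  | nil => simp [pvBFlat]
  | cons r rs ih =>
      rw [pvBFlat, if_neg (by simp [h r (List.mem_cons_self)]),
        ih (fun r' hr' => h r' (List.mem_cons_of_mem _ hr'))]
      simp

theorem pvRange9 : PySem.List.pyRange 0 9 1 = [0, 1, 2, 3, 4, 5, 6, 7, 8] := by decide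

-- B's comparison names a permutation of 0..8
theorem pvB_sorted_iff (flat : List Int) :
    (PySem.List.sorted flat (fun x => x) false == PySem.List.pyRange 0 9 1) = true ↔
      flat.Perm [0, 1, 2, 3, 4, 5, 6, 7, 8] := by
  rw [pvRange9, beq_iff_eq]
  constructor
  · intro h
    exact (h ▸ PySem.List.sorted_perm flat (fun x => x) false).symm
  · intro hp
    exact PySem.List.sorted_eq_of_perm_of_pairwise_lt flat
      [0, 1, 2, 3, 4, 5, 6, 7, 8] (fun x => x) hp.symm (by decide)

theorem pv_filter_perm (p : Int → Bool) (l : List Int) :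
    l.Perm (l.filter p ++ l.filter (fun v => !p v)) := by
  induction l with
  | nil => simp
  | cons x xs ih =>
      by_cases hp : p x
      · simpa [hp] using ih.cons x
      · simp only [List.filter_cons, hp]
        simpa using (ih.cons x).trans List.perm_middle.symm

-- the core equivalence on a flattened 9-cell board
theorem pvCore (flat : List Int) (hlen : flat.length = 9) :
    (pvGood flat PySem.Set.empty = true ∧ (flat.filter (fun v => v != 0)).length = 8) ↔
      flat.Perm [0, 1, 2, 3, 4, 5, 6, 7, 8] := by
  constructor
  · rintro ⟨hg, hl⟩
    simp only [pvGood, Bool.and_eq_true, decide_eq_true_eq, List.all_eq_true] at hg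
    obtain ⟨⟨hr, hn⟩, -⟩ := hg
    have hr' : ∀ x ∈ flat, 0 ≤ x ∧ x ≤ 8 := by
      intro x hx
      have := hr x hx
      simpa using this
    have hsub : flat.filter (fun v => v != 0) ⊆ [1, 2, 3, 4, 5, 6, 7, 8] := by
      intro x hx
      rw [List.mem_filter] at hx
      have hb := hr' x hx.1
      have hx0 : x ≠ 0 := by simpa using hx.2
      simp only [List.mem_cons, List.not_mem_nil, or_false]
      omega
    have perm1 : (flat.filter (fun v => v != 0)).Perm [1, 2, 3, 4, 5, 6, 7, 8] :=
      (List.subperm_of_subset hn hsub).perm_of_length_le (by simp [hl])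
    have hzlen : (flat.filter (fun v => !(v != 0))).length = 1 := by
      have := List.length_eq_length_filter_add (l := flat) (fun v => v != 0)
      omega
    have hz : flat.filter (fun v => !(v != 0)) = [0] := by
      rcases hzl : flat.filter (fun v => !(v != 0)) with - | ⟨a, t⟩
      · rw [hzl] at hzlen
        simp at hzlen
      · have ht : t = [] := by
          rw [hzl] at hzlen
          simpa using hzlen
        have ha : a = 0 := by
          have hmem : a ∈ flat.filter (fun v => !(v != 0)) := by
            rw [hzl]; exact List.mem_cons_self
          rw [List.mem_filter] at hmem
          simpa using hmem.2
        rw [ht, ha]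
    have h1 : flat.Perm (flat.filter (fun v => v != 0) ++ flat.filter (fun v => !(v != 0))) :=
      pv_filter_perm (fun v => v != 0) flat
    have h2 : (flat.filter (fun v => v != 0) ++ flat.filter (fun v => !(v != 0))).Perm
        ([1, 2, 3, 4, 5, 6, 7, 8] ++ [0]) := perm1.append (hz ▸ List.Perm.refl _)
    exact (h1.trans h2).trans List.perm_append_comm
  · intro hp
    have hnd : flat.Nodup := hp.nodup_iff.mpr (by decide)
    refine ⟨?_, ?_⟩
    · simp only [pvGood, Bool.and_eq_true, decide_eq_true_eq, List.all_eq_true]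
      refine ⟨⟨fun x hx => ?_, hnd.filter _⟩, fun x _ => by simp [PySem.Set.empty]⟩
      have hm : x ∈ [0, 1, 2, 3, 4, 5, 6, 7, 8] := hp.subset hx
      simp only [List.mem_cons, List.not_mem_nil, or_false] at hm
      omega
    · have := (hp.filter (fun v => v != 0)).length_eq
      simpa using this

-- ===== VERDICT (by name: the statement is the Claim_ definition above) =====
theorem is_valid_board_values_csp_spec : Claim_equal_is_valid_board_values_csp := by
  intro b _
  unfold Spec_is_valid_board_values_csp is_valid_board_values_csp is_valid_board_values_csp_alt
  by_cases hb : b.length = 3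
  · rw [if_neg (by simp [hb]), if_neg (by simp [hb])]
    by_cases hrows : ∀ r ∈ b, r.length = 3
    · rw [pvARows_eq_vals b _ _ hrows, pvBFlat_some b hrows, pvAVals_char]
      have hlen : b.flatten.length = 9 := by
        rcases b with - | ⟨r1, - | ⟨r2, - | ⟨r3, - | ⟨r4, t⟩⟩⟩⟩ <;> simp at hb
        simp [hrows r1 (by simp), hrows r2 (by simp), hrows r3 (by simp)]
      by_cases hg : pvGood b.flatten PySem.Set.empty = true
      · rw [if_pos hg]
        have hnd : (b.flatten.filter (fun v => v != 0)).Nodup := by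
          have h := hg
          simp only [pvGood, Bool.and_eq_true, decide_eq_true_eq] at h
          exact h.1.2
        have hupd : PySem.Set.update [] (b.flatten.filter (fun v => v != 0)) =
            b.flatten.filter (fun v => v != 0) := by
          rw [PySem.Set.update_nil_left, PySem.Set.ofList_eq_self_of_nodup _ hnd]
        show (decide ((0 : Int) + b.flatten.length = 9) &&
            decide ((PySem.Set.update ([] : PySem.Set Int)
              (b.flatten.filter (fun v => v != 0))).len = 8)) =
          (PySem.List.sorted b.flatten (fun x => x) false == PySem.List.pyRange 0 9 1)
        rw [hupd]
        have hc : decide ((0 : Int) + b.flatten.length = 9) = true := by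
          simp [hlen]
        by_cases hl : (b.flatten.filter (fun v => v != 0)).length = 8
        · have hperm := (pvCore b.flatten hlen).mp ⟨hg, hl⟩
          have hd : decide (PySem.Set.len (b.flatten.filter (fun v => v != 0)) = (8 : Int)) = true := by
            simp only [PySem.Set.len, decide_eq_true_eq]
            omega
          rw [(pvB_sorted_iff b.flatten).mpr hperm, hc, hd]
          rfl
        · have hB : (PySem.List.sorted b.flatten (fun x => x) false == PySem.List.pyRange 0 9 1) = false := by
            rw [Bool.eq_false_iff]
            intro hB
            exact hl ((pvCore b.flatten hlen).mpr ((pvB_sorted_iff b.flatten).mp hB)).2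
          have hd : decide (PySem.Set.len (b.flatten.filter (fun v => v != 0)) = (8 : Int)) = false := by
            simp only [PySem.Set.len, decide_eq_false_iff_not]
            omega
          rw [hB, hd, Bool.and_false]
      · rw [if_neg hg]
        show false = (PySem.List.sorted b.flatten (fun x => x) false == PySem.List.pyRange 0 9 1)
        have hB : (PySem.List.sorted b.flatten (fun x => x) false == PySem.List.pyRange 0 9 1) = false := by
          rw [Bool.eq_false_iff]
          intro hB
          exact hg ((pvCore b.flatten hlen).mpr ((pvB_sorted_iff b.flatten).mp hB)).1
        rw [hB]
    · have hex : ∃ r ∈ b, r.length ≠ 3 := by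
        push Not at hrows
        exact hrows
      rw [pvARows_none b _ _ hex, pvBFlat_none b hex]
  · rw [if_pos (by simp [hb]), if_pos (by simp [hb])]
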